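-- pv_equiv track=rewrite | github.com/confucianfighter/DLN_Transformer | tokenizer.py | _assignment_indices
-- ===== SOURCE A (Python) =====
-- def _assignment_indices(length: int) -> list[int]:
--     indices: list[int] = []
--     seen: set[int] = set()
--     step = 0
--
--     while len(indices) < length:
--         if step == 0:
--             candidate = 0
--         elif step % 2 == 1:
--             candidate = -((step + 1) // 2)
--         else:
--             candidate = step // 2
--
--         resolved = candidate if candidate >= 0 else length + candidate
--         if 0 <= resolved < length and resolved not in seen:
--             indices.append(resolved)
--             seen.add(resolved)
--         step += 1
--
--     return indices
-- ===== SOURCE B (Python) =====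
-- def _assignment_indices(length: int) -> list[int]:
--     out: list[int] = []
--     lo, hi = 0, length - 1
--     take_front = True
--     while lo <= hi:
--         if take_front:
--             out.append(lo)
--             lo += 1
--         else:
--             out.append(hi)
--             hi -= 1
--         take_front = not take_front
--     return out
-- ===== Notes on version B (the rewrite author's own statement) =====
-- stated objective: simpler
-- what changed: Replaces the step-counter loop with a membership set and candidate-resolution arithmetic by a two-pointer sweep (lo/hi with a front/back toggle) that needs no set and half the iterations.
import Mathlib
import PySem

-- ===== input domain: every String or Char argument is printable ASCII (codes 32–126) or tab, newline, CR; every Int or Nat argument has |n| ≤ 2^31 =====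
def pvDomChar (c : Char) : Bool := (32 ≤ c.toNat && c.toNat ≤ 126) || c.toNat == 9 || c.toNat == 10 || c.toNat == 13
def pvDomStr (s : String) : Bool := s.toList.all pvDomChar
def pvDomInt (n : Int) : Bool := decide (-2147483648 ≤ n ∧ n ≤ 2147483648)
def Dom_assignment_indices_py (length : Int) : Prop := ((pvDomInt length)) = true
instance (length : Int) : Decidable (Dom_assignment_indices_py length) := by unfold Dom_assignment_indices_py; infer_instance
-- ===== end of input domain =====

-- ===== PORT A =====
-- Literal port of A's while loop; 'fuel' only makes the recursion total (length.toNat + 1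
-- checks suffice: the loop appends every step until it exits).
def aLoop_assignment (length : Int) (indices : List Int) (seen : PySem.Set Int) (step : Int) : Nat → List Int
  | 0 => indices
  | fuel + 1 =>
    if (indices.length : Int) < length then
      let candidate : Int :=
        if step = 0 then 0
        else if PySem.Int.mod step 2 = 1 then -(PySem.Int.floordiv (step + 1) 2)
        else PySem.Int.floordiv step 2
      let resolved : Int := if candidate ≥ 0 then candidate else length + candidate
      if 0 ≤ resolved ∧ resolved < length ∧ ¬ resolved ∈ seen then
        aLoop_assignment length (indices ++ [resolved]) (PySem.Set.add seen resolved) (step + 1) fuel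
      else
        aLoop_assignment length indices seen (step + 1) fuel
    else indices

def assignment_indices_py (length : Int) : List Int :=
  aLoop_assignment length [] PySem.Set.empty 0 (length.toNat + 1)

-- ===== PORT B =====
-- Two-pointer sweep: emit lo or hi, toggling, while lo ≤ hi.
def bLoop_assignment (lo hi : Int) (takeFront : Bool) : List Int :=
  if lo ≤ hi then
    if takeFront then lo :: bLoop_assignment (lo + 1) hi false
    else hi :: bLoop_assignment lo (hi - 1) true
  else []
termination_by (hi + 1 - lo).toNat
decreasing_by all_goals omega

def assignment_indices_py_alt (length : Int) : List Int :=
  bLoop_assignment 0 (length - 1) true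

-- ===== PRECONDITION & SPEC =====
def Spec_assignment_indices_py (length : Int) (out : List Int) : Prop := out = assignment_indices_py_alt length
instance (length : Int) (out : List Int) : Decidable (Spec_assignment_indices_py length out) := by unfold Spec_assignment_indices_py; infer_instance

-- ===== CLAIM (what is proved, stated in full; the proofs are below) =====
def Claim_equal_assignment_indices_py : Prop := ∀ (length : Int), Dom_assignment_indices_py length → Spec_assignment_indices_py length (assignment_indices_py length)

-- ===== LEMMAS AND PROOFS =====

-- The loop invariant: at the beginning of an iteration of A's loop, if `front` then the
-- next candidate resolves to `lo` (step = 2*lo), else it resolves to `hi` (step = 2*lo - 1),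
-- `seen` holds exactly the indices already emitted ({0..lo-1} ∪ {hi+1..length-1}), and
-- the remaining output is exactly B's two-pointer sweep from (lo, hi, front).
theorem aLoop_eq_bLoop : ∀ (fuel : Nat) (length lo hi step : Int) (front : Bool)
    (ind : List Int) (seen : PySem.Set Int),
    0 ≤ lo →
    (if front then step = 2 * lo ∧ hi = length - 1 - lo
     else step = 2 * lo - 1 ∧ hi = length - lo) →
    (ind.length : Int) = step →
    (∀ x : Int, x ∈ seen ↔ ((0 ≤ x ∧ x < lo) ∨ (hi < x ∧ x < length))) →
    (length - step).toNat < fuel →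
    aLoop_assignment length ind seen step fuel = ind ++ bLoop_assignment lo hi front := by
  intro fuel
  induction fuel with
  | zero => intro length lo hi step front ind seen _ _ _ _ hfuel; omega
  | succ fuel ih =>
    intro length lo hi step front ind seen hlo hst hlen hseen hfuel
    cases front with
    | true =>
      obtain ⟨hstep, hhi⟩ := hst
      by_cases hcont : (ind.length : Int) < length
      · have hle : lo ≤ hi := by omega
        have hcand : (if step = 0 then (0 : Int)
            else if PySem.Int.mod step 2 = 1 then -(PySem.Int.floordiv (step + 1) 2)
            else PySem.Int.floordiv step 2) = lo := by
          simp only [PySem.Int.mod, PySem.Int.floordiv]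
          split_ifs with h0 h1
          · omega
          · exfalso; rw [Int.fmod_eq_emod] at h1; omega
          · rw [Int.fdiv_eq_ediv]; omega
        have hres : ¬ (lo : Int) ∈ seen := by
          intro h; rw [hseen] at h; omega
        rw [aLoop_assignment]
        simp only [hcont, if_true, hcand]
        rw [if_pos hlo.ge]
        have hin : 0 ≤ lo ∧ lo < length ∧ ¬ (lo : Int) ∈ seen := ⟨hlo, by omega, hres⟩
        rw [if_pos hin]
        rw [ih length (lo + 1) hi (step + 1) false (ind ++ [lo]) (PySem.Set.add seen lo)
            (by omega) (by simp only [Bool.false_eq_true, if_false]; constructor <;> omega)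
            (by simp; omega)
            (by intro x
                rw [PySem.Set.mem_add, hseen]
                constructor
                · rintro (h | h) <;> omega
                · intro h; by_cases hx : x = lo
                  · right; exact hx
                  · left; omega)
            (by omega)]
        conv_rhs => rw [bLoop_assignment]
        rw [if_pos hle]
        simp
      · have hdone : ¬ lo ≤ hi := by omega
        rw [aLoop_assignment]
        simp only [hcont, if_false]
        rw [bLoop_assignment, if_neg hdone, List.append_nil]
    | false =>
      obtain ⟨hstep, hhi⟩ := hst
      by_cases hcont : (ind.length : Int) < length
      · have hle : lo ≤ hi := by omega
        have hlo1 : 1 ≤ lo := by omega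
        have hcand : (if step = 0 then (0 : Int)
            else if PySem.Int.mod step 2 = 1 then -(PySem.Int.floordiv (step + 1) 2)
            else PySem.Int.floordiv step 2) = -lo := by
          simp only [PySem.Int.mod, PySem.Int.floordiv]
          split_ifs with h0 h1
          · omega
          · rw [Int.fdiv_eq_ediv]; omega
          · exfalso; rw [Int.fmod_eq_emod] at h1; omega
        have hres : ¬ (hi : Int) ∈ seen := by
          intro h; rw [hseen] at h; omega
        rw [aLoop_assignment]
        simp only [hcont, if_true, hcand]
        rw [if_neg (by omega : ¬ (-lo : Int) ≥ 0)]
        have hval : length + -lo = hi := by omega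
        rw [hval]
        have hin : 0 ≤ hi ∧ hi < length ∧ ¬ (hi : Int) ∈ seen := ⟨by omega, by omega, hres⟩
        rw [if_pos hin]
        rw [ih length lo (hi - 1) (step + 1) true (ind ++ [hi]) (PySem.Set.add seen hi)
            hlo (by simp only [if_true]; constructor <;> omega)
            (by simp; omega)
            (by intro x
                rw [PySem.Set.mem_add, hseen]
                constructor
                · rintro (h | h) <;> omega
                · intro h; by_cases hx : x = hi
                  · right; exact hx
                  · left; omega)
            (by omega)]
        conv_rhs => rw [bLoop_assignment]
        rw [if_pos hle]
        simp
      · have hdone : ¬ lo ≤ hi := by omega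
        rw [aLoop_assignment]
        simp only [hcont, if_false]
        rw [bLoop_assignment, if_neg hdone, List.append_nil]

-- ===== VERDICT (by name: the statement is the Claim_ definition above) =====
theorem assignment_indices_py_spec : Claim_equal_assignment_indices_py := by
  intro length _
  unfold Spec_assignment_indices_py assignment_indices_py assignment_indices_py_alt
  rw [aLoop_eq_bLoop (length.toNat + 1) length 0 (length - 1) 0 true [] PySem.Set.empty
      le_rfl (by constructor <;> omega) (by simp)
      (by intro x; simp only [PySem.Set.empty, List.not_mem_nil, false_iff]; omega) (by omega)]
  simp
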